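-- pv_equiv track=rewrite | github.com/Siddhesh25082001/Infytq-Preparation | Infytq-Python-PYQs/6.py | solve6
-- ===== SOURCE A (Python) =====
-- def solve6(sentence):
--
--     temp = sentence.split(",")
--
--     names, numList = [], []
--     for element in temp:
--         names.append(element.split(":")[0])
--         numList.append(element.split(":")[1])
--
--     ans = ""
--     k = 0
--     for i in range(0, len(numList)):
--
--         largest = -100
--         for j in range(0, len(numList[i])):
--             if int(numList[i][j]) <= len(names[i]) and int(numList[i][j]) >= largest:
--                 largest = int(numList[i][j])
--
--         if largest == -100: ans = ans + 'X'
--         else: ans = ans + names[k][largest - 1]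
--         k = k + 1
--
--     return ans
-- ===== SOURCE B (Python) =====
-- def solve6(sentence):
--     out = []
--     for element in sentence.split(","):
--         parts = element.split(":")
--         name, number = parts[0], parts[1]
--         digits = set(number)
--         largest = next((d for d in range(min(len(name), 9), -1, -1) if str(d) in digits), None)
--         out.append('X' if largest is None else name[largest - 1])
--     return "".join(out)
-- ===== Notes on version B (the rewrite author's own statement) =====
-- stated objective: idiomatic
-- what changed: Instead of scanning every character of the number string with a running maximum and repeated int() conversions, B builds a set of the number's characters once and scans candidate digit values from min(len(name),9) down to 0, taking the first one present in the set.
import Mathlib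
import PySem

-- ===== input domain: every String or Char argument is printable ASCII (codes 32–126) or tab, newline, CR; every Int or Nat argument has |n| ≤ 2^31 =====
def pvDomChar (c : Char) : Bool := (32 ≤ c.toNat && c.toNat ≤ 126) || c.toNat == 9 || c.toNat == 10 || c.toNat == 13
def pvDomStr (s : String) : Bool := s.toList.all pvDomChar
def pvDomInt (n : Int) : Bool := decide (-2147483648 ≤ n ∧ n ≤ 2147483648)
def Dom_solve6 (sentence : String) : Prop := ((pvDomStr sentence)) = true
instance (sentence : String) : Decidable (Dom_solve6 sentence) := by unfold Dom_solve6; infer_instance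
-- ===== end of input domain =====

-- B scans candidate digit values 9..0 against a set built from the number string instead of
-- scanning the number string with a running maximum; alternative decomposition, not claimed faster.

-- ===== PORT A =====
-- literal transliteration of A; totalised with pyGetD defaults, valid under Pre_solve6
def solve6 (sentence : String) : String :=
  let temp := PySem.Chars.splitOn sentence.toList [',']
  let lists := temp.foldl (fun (acc : List (List Char) × List (List Char)) element =>
      (acc.1 ++ [PySem.List.pyGetD (PySem.Chars.splitOn element [':']) 0 []],
       acc.2 ++ [PySem.List.pyGetD (PySem.Chars.splitOn element [':']) 1 []]))
    ([], [])
  let names := lists.1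
  let numList := lists.2
  let fin := (PySem.List.pyRange 0 (PySem.List.len numList) 1).foldl
    (fun (st : List Char × Int) i =>
      let num := PySem.List.pyGetD numList i []
      let largest := (PySem.List.pyRange 0 (PySem.List.len num) 1).foldl
        (fun (largest : Int) j =>
          let v := (PySem.Int.ofChars? [PySem.List.pyGetD num j ' ']).getD 0
          if v ≤ PySem.List.len (PySem.List.pyGetD names i []) ∧ largest ≤ v then v else largest)
        (-100)
      if largest = -100 then (st.1 ++ ['X'], st.2 + 1)
      else (st.1 ++ [PySem.List.pyGetD (PySem.List.pyGetD names st.2 []) (largest - 1) ' '], st.2 + 1))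
    ([], 0)
  String.ofList fin.1

-- ===== PORT B =====
-- literal transliteration of Source B
def solve6_alt (sentence : String) : String :=
  let out := (PySem.Chars.splitOn sentence.toList [',']).foldl
    (fun (out : List String) element =>
      let parts := PySem.Chars.splitOn element [':']
      let name := PySem.List.pyGetD parts 0 []
      let number := PySem.List.pyGetD parts 1 []
      let digits : PySem.Set String := PySem.Set.ofList (number.map (fun c => String.ofList [c]))
      let largest := (PySem.List.pyRange (min (PySem.List.len name) 9) (-1) (-1)).find?
        (fun d => digits.contains (PySem.Int.toStr d))
      match largest with
      | none => out ++ ["X"]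
      | some d => out ++ [String.ofList [PySem.List.pyGetD name (d - 1) ' ']])
    []
  PySem.Str.join "" out

-- ===== PRECONDITION & SPEC =====
-- Pre_ excludes exactly the inputs where Python A raises: a comma segment with no ':' (IndexError),
-- a non-digit character in the number part (ValueError from int), and an empty name whose number
-- contains '0' (IndexError from name[-1]).
def Pre_solve6 (sentence : String) : Prop :=
  ((PySem.Chars.splitOn sentence.toList [',']).all (fun e =>
    decide (2 ≤ (PySem.Chars.splitOn e [':']).length) &&
    ((PySem.Chars.splitOn e [':']).getD 1 []).all
      (fun c => (['0', '1', '2', '3', '4', '5', '6', '7', '8', '9'] : List Char).contains c) &&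
    !(((PySem.Chars.splitOn e [':']).getD 0 []).isEmpty &&
      ((PySem.Chars.splitOn e [':']).getD 1 []).contains '0'))) = true

instance (sentence : String) : Decidable (Pre_solve6 sentence) := by
  unfold Pre_solve6; infer_instance

def pvWitness_solve6 : String := "ab:12"

def Spec_solve6 (sentence : String) (out : String) : Prop := out = solve6_alt sentence
instance (sentence : String) (out : String) : Decidable (Spec_solve6 sentence out) := by
  unfold Spec_solve6; infer_instance

-- ===== CLAIM (what is proved, stated in full; the proofs are below) =====
def Claim_equal_solve6 : Prop := ∀ (sentence : String), Dom_solve6 sentence → Pre_solve6 sentence → Spec_solve6 sentence (solve6 sentence)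

-- ===== LEMMAS AND PROOFS =====

-- abbreviations for the two fields of an element (proof-side only)
def pvName (e : List Char) : List Char := PySem.List.pyGetD (PySem.Chars.splitOn e [':']) 0 []
def pvNum (e : List Char) : List Char := PySem.List.pyGetD (PySem.Chars.splitOn e [':']) 1 []

def pvDigits : List Char := ['0', '1', '2', '3', '4', '5', '6', '7', '8', '9']

-- value of a digit character
def pvVal (c : Char) : Int := (c.toNat : Int) - 48

-- B's per-element chunk (characters appended for one element)
def pvChunk (e : List Char) : List Char :=
  match (PySem.List.pyRange (min (PySem.List.len (pvName e)) 9) (-1) (-1)).find?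
      (fun d => (PySem.Set.ofList ((pvNum e).map (fun c => String.ofList [c]))).contains
        (PySem.Int.toStr d)) with
  | none => ['X']
  | some d => [PySem.List.pyGetD (pvName e) (d - 1) ' ']

-- A's inner loop over one element, with the element's own name/number fields
def pvInnerA (e : List Char) : Int :=
  (PySem.List.pyRange 0 (PySem.List.len (pvNum e)) 1).foldl
    (fun (largest : Int) j =>
      let v := (PySem.Int.ofChars? [PySem.List.pyGetD (pvNum e) j ' ']).getD 0
      if v ≤ PySem.List.len (pvName e) ∧ largest ≤ v then v else largest) (-100)

lemma pvFoldPair {α β γ : Type} (f : α → β) (g : α → γ) :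
    ∀ (l : List α) (xs : List β) (ys : List γ),
    l.foldl (fun acc e => (acc.1 ++ [f e], acc.2 ++ [g e])) (xs, ys)
      = (xs ++ l.map f, ys ++ l.map g) := by
  intro l
  induction l with
  | nil => simp
  | cons e t ih => intro xs ys; simp [ih]

lemma pvVal_ofChars (c : Char) (h : c ∈ pvDigits) :
    PySem.Int.ofChars? [c] = some (pvVal c) := by
  fin_cases h <;> decide

lemma pvVal_bounds (c : Char) (h : c ∈ pvDigits) : 0 ≤ pvVal c ∧ pvVal c ≤ 9 := by
  fin_cases h <;> decide

lemma pvToStr_eq (d : Int) (h0 : 0 ≤ d) (h9 : d ≤ 9) (c : Char) (hc : c ∈ pvDigits) :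
    (String.ofList [c] = PySem.Int.toStr d) ↔ pvVal c = d := by
  interval_cases d <;> (fin_cases hc <;> decide)

lemma pvPred_iff (num : List Char) (hdig : ∀ c ∈ num, c ∈ pvDigits)
    (d : Int) (h0 : 0 ≤ d) (h9 : d ≤ 9) :
    ((PySem.Set.ofList (num.map (fun c => String.ofList [c]))).contains
        (PySem.Int.toStr d) = true) ↔ ∃ c ∈ num, pvVal c = d := by
  rw [PySem.Set.contains_iff, PySem.Set.mem_ofList, List.mem_map]
  constructor
  · rintro ⟨c, hc, heq⟩
    exact ⟨c, hc, (pvToStr_eq d h0 h9 c (hdig c hc)).mp heq⟩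
  · rintro ⟨c, hc, heq⟩
    exact ⟨c, hc, (pvToStr_eq d h0 h9 c (hdig c hc)).mpr heq⟩

lemma pvInner_eq (cap : Int) (cs : List Char) (hdig : ∀ c ∈ cs, c ∈ pvDigits) :
    ∀ L : Int,
    cs.foldl (fun (largest : Int) c =>
        let v := (PySem.Int.ofChars? [c]).getD 0
        if v ≤ cap ∧ largest ≤ v then v else largest) L
      = ((cs.map pvVal).filter (fun v => decide (v ≤ cap))).foldl max L := by
  intro L
  rw [PySem.List.foldl_congr_mem cs _
    (fun (largest : Int) c => if pvVal c ≤ cap then max largest (pvVal c) else largest) L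
    (by
      intro acc x hx
      simp only [pvVal_ofChars x (hdig x hx), Option.getD_some]
      split_ifs with h1 h2 h2 <;> omega)]
  clear hdig
  induction cs generalizing L with
  | nil => simp
  | cons c t ih =>
    rw [List.foldl_cons, List.map_cons, List.filter_cons]
    by_cases hcap : pvVal c ≤ cap
    · simp only [hcap, if_true, decide_true, List.foldl_cons]
      exact ih (max L (pvVal c))
    · simp only [hcap, if_false, decide_false]
      exact ih L

lemma pvFind_none (p : Int → Bool) : ∀ n : Nat,
    ((PySem.List.pyRange (n : Int) (-1) (-1)).find? p = none) ↔
      (∀ d : Nat, d ≤ n → p d = false) := by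
  intro n
  induction n with
  | zero =>
    rw [PySem.List.pyRange_neg_one_cons (by norm_num),
      PySem.List.pyRange_neg_one_eq_nil (by norm_num)]
    constructor
    · intro h d hd
      have hd0 : d = 0 := by omega
      subst hd0
      cases hp : p 0 with
      | false => rfl
      | true => rw [List.find?_cons] at h; simp [hp] at h
    · intro h
      have h0 := h 0 (le_refl 0)
      rw [List.find?_cons]
      rw [show ((0 : Nat) : Int) = 0 from rfl] at h0
      simp [h0]
  | succ n ih =>
    rw [PySem.List.pyRange_neg_one_cons (by push_cast; omega)]
    have hc : ((n + 1 : Nat) : Int) - 1 = (n : Int) := by push_cast; ring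
    rw [hc, List.find?_cons]
    cases hp : p ((n + 1 : Nat) : Int) with
    | true =>
      simp only
      constructor
      · intro h; exact absurd h (by simp)
      · intro h
        have := h (n + 1) (le_refl _)
        rw [this] at hp
        exact absurd hp (by simp)
    | false =>
      simp only
      rw [ih]
      constructor
      · intro h d hd
        rcases Nat.lt_or_ge d (n + 1) with hlt | hge
        · exact h d (by omega)
        · have : d = n + 1 := by omega
          subst this; exact hp
      · intro h d hd
        exact h d (by omega)

lemma pvFind_some (p : Int → Bool) : ∀ (n : Nat) (m : Int),
    ((PySem.List.pyRange (n : Int) (-1) (-1)).find? p = some m) ↔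
      (0 ≤ m ∧ m ≤ n ∧ p m = true ∧ ∀ d : Nat, m < (d : Int) → d ≤ n → p d = false) := by
  intro n
  induction n with
  | zero =>
    intro m
    rw [PySem.List.pyRange_neg_one_cons (by norm_num),
      PySem.List.pyRange_neg_one_eq_nil (by norm_num), List.find?_cons]
    cases hp : p 0 with
    | true =>
      simp only
      constructor
      · intro h
        have hm : m = 0 := by simpa using h.symm
        subst hm
        refine ⟨le_refl 0, by norm_num, hp, ?_⟩
        intro d hd1 hd2
        omega
      · rintro ⟨h0, h1, _, _⟩
        have : m = 0 := by omega
        simp [this]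
    | false =>
      simp only
      constructor
      · intro h; simp at h
      · rintro ⟨h0, h1, hpm, _⟩
        have : m = 0 := by omega
        subst this
        rw [hpm] at hp; exact absurd hp (by simp)
  | succ n ih =>
    intro m
    rw [PySem.List.pyRange_neg_one_cons (by push_cast; omega)]
    have hc : ((n + 1 : Nat) : Int) - 1 = (n : Int) := by push_cast; ring
    rw [hc, List.find?_cons]
    cases hp : p ((n + 1 : Nat) : Int) with
    | true =>
      simp only
      constructor
      · intro h
        have hm : m = ((n + 1 : Nat) : Int) := by simpa using h.symm
        subst hm
        refine ⟨by positivity, le_refl _, hp, ?_⟩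
        intro d hd1 hd2
        have : (d : Int) ≤ ((n + 1 : Nat) : Int) := by exact_mod_cast hd2
        omega
      · rintro ⟨h0, h1, hpm, hmax⟩
        have hm : m = ((n + 1 : Nat) : Int) := by
          by_contra hne
          have hlt : m < ((n + 1 : Nat) : Int) := lt_of_le_of_ne h1 hne
          have := hmax (n + 1) hlt (le_refl _)
          rw [this] at hp
          exact absurd hp (by simp)
        simp [hm]
    | false =>
      simp only
      rw [ih m]
      constructor
      · rintro ⟨h0, h1, hpm, hmax⟩
        refine ⟨h0, by push_cast; omega, hpm, ?_⟩
        intro d hd1 hd2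
        rcases Nat.lt_or_ge d (n + 1) with hlt | hge
        · exact hmax d hd1 (by omega)
        · have : d = n + 1 := by omega
          subst this; exact hp
      · rintro ⟨h0, h1, hpm, hmax⟩
        have hm1 : m ≤ (n : Int) := by
          by_contra hgt
          push Not at hgt
          have hle : m ≤ ((n + 1 : Nat) : Int) := h1
          have : m = ((n + 1 : Nat) : Int) := by push_cast at hle hgt ⊢; omega
          rw [this] at hpm
          rw [hpm] at hp
          exact absurd hp (by simp)
        exact ⟨h0, hm1, hpm, fun d hd1 hd2 => hmax d hd1 (by omega)⟩

lemma pvElem (e : List Char) (hdig : ∀ c ∈ pvNum e, c ∈ pvDigits) :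
    (if pvInnerA e = -100 then (['X'] : List Char)
     else [PySem.List.pyGetD (pvName e) (pvInnerA e - 1) ' ']) = pvChunk e := by
  set cap := PySem.List.len (pvName e) with hcap
  have hcap0 : 0 ≤ cap := by rw [hcap, PySem.List.len_eq]; positivity
  set a := min cap 9 with ha
  have ha0 : 0 ≤ a := by omega
  have ha9 : a ≤ 9 := by omega
  have hna : ((a.toNat : Nat) : Int) = a := Int.toNat_of_nonneg ha0
  set p : Int → Bool := fun d =>
    (PySem.Set.ofList ((pvNum e).map (fun c => String.ofList [c]))).contains
      (PySem.Int.toStr d) with hp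
  have hpred : ∀ d : Int, 0 ≤ d → d ≤ 9 → (p d = true ↔ ∃ c ∈ pvNum e, pvVal c = d) :=
    fun d h0 h9 => pvPred_iff (pvNum e) hdig d h0 h9
  have hA : pvInnerA e
      = (((pvNum e).map pvVal).filter (fun v => decide (v ≤ cap))).foldl max (-100) := by
    unfold pvInnerA
    rw [show PySem.List.len (pvNum e) = ((pvNum e).length : Int) from PySem.List.len_eq _]
    rw [PySem.List.foldl_pyRange_zero_pyGetD' (pvNum e) ' '
      (fun (largest : Int) c =>
        let v := (PySem.Int.ofChars? [c]).getD 0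
        if v ≤ cap ∧ largest ≤ v then v else largest) (-100)]
    exact pvInner_eq cap (pvNum e) hdig (-100)
  unfold pvChunk
  rw [← hcap, ← ha, ← hp, ← hna]
  cases hfind : (PySem.List.pyRange ((a.toNat : Nat) : Int) (-1) (-1)).find? p with
  | none =>
    have hnone := (pvFind_none p a.toNat).mp hfind
    have hfil : ((pvNum e).map pvVal).filter (fun v => decide (v ≤ cap)) = [] := by
      rw [List.filter_eq_nil_iff]
      rintro v hv hdec
      obtain ⟨c, hc, rfl⟩ := List.mem_map.mp hv
      have hb := pvVal_bounds c (hdig c hc)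
      have hle : pvVal c ≤ cap := by simpa using hdec
      have hlea : pvVal c ≤ a := by omega
      have hfalse := hnone (pvVal c).toNat (by omega)
      rw [Int.toNat_of_nonneg hb.1] at hfalse
      have htrue := (hpred (pvVal c) hb.1 hb.2).mpr ⟨c, hc, rfl⟩
      rw [htrue] at hfalse
      exact absurd hfalse (by simp)
    rw [hA, hfil]
    simp
  | some m =>
    obtain ⟨hm0, hma, hpm, hmax⟩ := (pvFind_some p a.toNat m).mp hfind
    rw [hna] at hma
    obtain ⟨c, hc, hvc⟩ := (hpred m hm0 (by omega)).mp hpm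
    have hmem : m ∈ ((pvNum e).map pvVal).filter (fun v => decide (v ≤ cap)) := by
      rw [List.mem_filter]
      exact ⟨List.mem_map.mpr ⟨c, hc, hvc⟩, by simp; omega⟩
    have hub : ∀ v ∈ ((pvNum e).map pvVal).filter (fun v => decide (v ≤ cap)), v ≤ m := by
      intro v hv
      rw [List.mem_filter] at hv
      obtain ⟨c', hc', rfl⟩ := List.mem_map.mp hv.1
      have hb := pvVal_bounds c' (hdig c' hc')
      have hle : pvVal c' ≤ cap := by simpa using hv.2
      by_contra hgt
      push Not at hgt
      have hfalse := hmax (pvVal c').toNat (by omega) (by omega)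
      rw [Int.toNat_of_nonneg hb.1] at hfalse
      have htrue := (hpred (pvVal c') hb.1 hb.2).mpr ⟨c', hc', rfl⟩
      rw [htrue] at hfalse
      exact absurd hfalse (by simp)
    have hres : pvInnerA e = m := by
      rw [hA]
      have h1 := (PySem.List.le_foldl_max
        (((pvNum e).map pvVal).filter (fun v => decide (v ≤ cap))) (-100)).2 m hmem
      rcases PySem.List.foldl_max_mem
          (((pvNum e).map pvVal).filter (fun v => decide (v ≤ cap))) (-100) with h2 | h2
      · omega
      · have := hub _ h2
        omega
    rw [hres, if_neg (by omega)]

-- bridge from the getD-formulation in Pre_ to pvNum/pvName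
lemma pvNum_eq_getD (e : List Char) :
    pvNum e = (PySem.Chars.splitOn e [':']).getD 1 [] := by
  unfold pvNum
  rw [show (1 : Int) = ((1 : Nat) : Int) from rfl, PySem.List.pyGetD_natCast]

lemma pvListsEq (temp : List (List Char)) :
    temp.foldl (fun (acc : List (List Char) × List (List Char)) element =>
      (acc.1 ++ [PySem.List.pyGetD (PySem.Chars.splitOn element [':']) 0 []],
       acc.2 ++ [PySem.List.pyGetD (PySem.Chars.splitOn element [':']) 1 []]))
    ([], []) = (temp.map pvName, temp.map pvNum) := by
  simpa [pvName, pvNum] using pvFoldPair pvName pvNum temp [] []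

-- A's outer-loop body with the inner loop abstracted into pvInnerA
def pvGStep (full : List (List Char)) (st : List Char × Int) (i : Int) : List Char × Int :=
  if pvInnerA (PySem.List.pyGetD full i []) = -100 then (st.1 ++ ['X'], st.2 + 1)
  else (st.1 ++ [PySem.List.pyGetD (PySem.List.pyGetD (full.map pvName) st.2 [])
    (pvInnerA (PySem.List.pyGetD full i []) - 1) ' '], st.2 + 1)

lemma pvCongr (full : List (List Char)) (init : List Char × Int) :
    (PySem.List.pyRange 0 (full.length : Int) 1).foldl
      (fun (st : List Char × Int) i =>
        let num := PySem.List.pyGetD (full.map pvNum) i []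
        let largest := (PySem.List.pyRange 0 (PySem.List.len num) 1).foldl
          (fun (largest : Int) j =>
            let v := (PySem.Int.ofChars? [PySem.List.pyGetD num j ' ']).getD 0
            if v ≤ PySem.List.len (PySem.List.pyGetD (full.map pvName) i []) ∧ largest ≤ v
            then v else largest) (-100)
        if largest = -100 then (st.1 ++ ['X'], st.2 + 1)
        else (st.1 ++ [PySem.List.pyGetD (PySem.List.pyGetD (full.map pvName) st.2 [])
          (largest - 1) ' '], st.2 + 1)) init
    = (PySem.List.pyRange 0 (full.length : Int) 1).foldl (pvGStep full) init := by
  apply PySem.List.foldl_congr_mem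
  intro st i hi
  rw [PySem.List.mem_pyRange_one] at hi
  have hnum : PySem.List.pyGetD (full.map pvNum) i [] = pvNum (PySem.List.pyGetD full i []) := by
    rw [PySem.List.pyGetD_eq_getElem (full.map pvNum) [] hi.1 (by simpa using hi.2),
      PySem.List.pyGetD_eq_getElem full [] hi.1 (by simpa using hi.2)]
    simp
  have hname : PySem.List.pyGetD (full.map pvName) i [] = pvName (PySem.List.pyGetD full i []) := by
    rw [PySem.List.pyGetD_eq_getElem (full.map pvName) [] hi.1 (by simpa using hi.2),
      PySem.List.pyGetD_eq_getElem full [] hi.1 (by simpa using hi.2)]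
    simp
  simp only [hnum, hname, pvGStep]
  rfl

lemma pvGAux (full : List (List Char))
    (hdig : ∀ e ∈ full, ∀ c ∈ pvNum e, c ∈ pvDigits) :
    ∀ (rest pre : List (List Char)), pre ++ rest = full → ∀ acc : List Char,
    (PySem.List.pyRange (pre.length : Int) (full.length : Int) 1).foldl (pvGStep full)
      (acc, (pre.length : Int))
    = (acc ++ rest.flatMap pvChunk, (full.length : Int)) := by
  intro rest
  induction rest with
  | nil =>
    intro pre h acc
    have hlen : pre.length = full.length := by rw [← h]; simp
    rw [hlen, PySem.List.pyRange_one_eq_nil (le_refl _)]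
    simp
  | cons e rest' ih =>
    intro pre h acc
    have hlt : pre.length < full.length := by rw [← h]; simp
    rw [PySem.List.pyRange_one_cons (by exact_mod_cast hlt), List.foldl_cons]
    have hE : PySem.List.pyGetD full ((pre.length : Nat) : Int) [] = e := by
      rw [← h, PySem.List.pyGetD_natCast]
      simp
    have hname : PySem.List.pyGetD (full.map pvName) ((pre.length : Nat) : Int) [] = pvName e := by
      rw [← h, PySem.List.pyGetD_natCast]
      simp
    have hchunk := pvElem e (hdig e (by rw [← h]; simp))
    have hstep : pvGStep full (acc, (pre.length : Int)) (pre.length : Int)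
        = (acc ++ pvChunk e, (pre.length : Int) + 1) := by
      unfold pvGStep
      rw [hE]
      by_cases hl : pvInnerA e = -100
      · rw [if_pos hl] at hchunk
        rw [if_pos hl, ← hchunk]
      · rw [if_neg hl] at hchunk
        rw [if_neg hl, hname, ← hchunk]
    rw [hstep]
    have h' : (pre ++ [e]) ++ rest' = full := by rw [← h]; simp
    have := ih (pre ++ [e]) h' (acc ++ pvChunk e)
    simp only [List.length_append, List.length_cons, List.length_nil] at this
    rw [show ((pre.length : Int) + 1) = (((pre.length + 1 : Nat)) : Int) by push_cast; ring]
    rw [this]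
    simp

lemma pvOuter (full : List (List Char))
    (hdig : ∀ e ∈ full, ∀ c ∈ pvNum e, c ∈ pvDigits) (acc : List Char) :
    (PySem.List.pyRange 0 (full.length : Int) 1).foldl (pvGStep full) (acc, 0)
    = (acc ++ full.flatMap pvChunk, (full.length : Int)) := by
  simpa using pvGAux full hdig full [] (by simp) acc

lemma pvBfold (temp : List (List Char)) : ∀ acc : List String,
    temp.foldl
      (fun (out : List String) element =>
        let parts := PySem.Chars.splitOn element [':']
        let name := PySem.List.pyGetD parts 0 []
        let number := PySem.List.pyGetD parts 1 []
        let digits : PySem.Set String := PySem.Set.ofList (number.map (fun c => String.ofList [c]))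
        let largest := (PySem.List.pyRange (min (PySem.List.len name) 9) (-1) (-1)).find?
          (fun d => digits.contains (PySem.Int.toStr d))
        match largest with
        | none => out ++ ["X"]
        | some d => out ++ [String.ofList [PySem.List.pyGetD name (d - 1) ' ']]) acc
    = acc ++ temp.map (fun e => String.ofList (pvChunk e)) := by
  induction temp with
  | nil => intro acc; simp
  | cons e t ih =>
    intro acc
    rw [List.foldl_cons]
    have hstep :
        (let parts := PySem.Chars.splitOn e [':']
         let name := PySem.List.pyGetD parts 0 []
         let number := PySem.List.pyGetD parts 1 []
         let digits : PySem.Set String := PySem.Set.ofList (number.map (fun c => String.ofList [c]))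
         let largest := (PySem.List.pyRange (min (PySem.List.len name) 9) (-1) (-1)).find?
           (fun d => digits.contains (PySem.Int.toStr d))
         match largest with
         | none => acc ++ ["X"]
         | some d => acc ++ [String.ofList [PySem.List.pyGetD name (d - 1) ' ']])
        = acc ++ [String.ofList (pvChunk e)] := by
      simp only [pvChunk, pvName, pvNum]
      cases hfind : (PySem.List.pyRange
            (min (PySem.List.len (PySem.List.pyGetD (PySem.Chars.splitOn e [':']) 0 [])) 9)
            (-1) (-1)).find?
          (fun d => (PySem.Set.ofList ((PySem.List.pyGetD (PySem.Chars.splitOn e [':']) 1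
            []).map (fun c => String.ofList [c]))).contains (PySem.Int.toStr d)) with
      | none => rfl
      | some d => rfl
    rw [hstep, ih (acc ++ [String.ofList (pvChunk e)])]
    simp

lemma pvJoinNil : ∀ l : List (List Char), PySem.Chars.join [] l = l.flatten := by
  intro l
  induction l with
  | nil => simp [PySem.Chars.join_nil]
  | cons p t ih =>
    cases t with
    | nil => simp [PySem.Chars.join_singleton]
    | cons q r =>
      rw [PySem.Chars.join_cons_cons]
      simp only [List.flatten_cons] at ih ⊢
      rw [ih]
      simp

lemma pvJoin (l : List (List Char)) :
    PySem.Str.join "" (l.map (fun e => String.ofList e)) = String.ofList l.flatten := by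
  simp [PySem.Str.join, pvJoinNil, Function.comp_def]

-- ===== VERDICT (by name: the statement is the Claim_ definition above) =====
theorem solve6_spec : Claim_equal_solve6 := by
  intro sentence _hdom hpre
  unfold Spec_solve6
  show solve6 sentence = solve6_alt sentence
  have hdig : ∀ e ∈ PySem.Chars.splitOn sentence.toList [','],
      ∀ c ∈ pvNum e, c ∈ pvDigits := by
    unfold Pre_solve6 at hpre
    rw [List.all_eq_true] at hpre
    intro e he c hc
    rw [pvNum_eq_getD] at hc
    have := hpre e he
    simp only [Bool.and_eq_true, List.all_eq_true] at this
    have h2 := this.1.2 c hc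
    unfold pvDigits
    simpa using h2
  unfold solve6 solve6_alt
  simp only [pvListsEq]
  rw [show PySem.List.len ((PySem.Chars.splitOn sentence.toList [',']).map pvNum)
      = (((PySem.Chars.splitOn sentence.toList [',']).length : Nat) : Int) from by
    rw [PySem.List.len_eq]; simp]
  rw [pvCongr (PySem.Chars.splitOn sentence.toList [','])]
  rw [pvOuter (PySem.Chars.splitOn sentence.toList [',']) hdig []]
  rw [pvBfold (PySem.Chars.splitOn sentence.toList [',']) []]
  rw [show ((PySem.Chars.splitOn sentence.toList [',']).map (fun e => String.ofList (pvChunk e)))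
      = ((PySem.Chars.splitOn sentence.toList [',']).map pvChunk).map (fun e => String.ofList e)
      from by simp [List.map_map]]
  simp only [List.nil_append]
  rw [pvJoin (((PySem.Chars.splitOn sentence.toList [',']).map pvChunk))]
  rw [List.flatMap_def]
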